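-- pv_equiv track=rewrite | github.com/m-hamza-mughal/RAG-Gesture | mogen/datasets/beatx_dataset.py | merge_disco_textsegs
-- ===== SOURCE A (Python) =====
-- import copy
--
-- def merge_disco_textsegs(textsegs):
--     # merge text segments with the same start and end time into one
--     textsegs = copy.deepcopy(textsegs)
--     merged_textsegs = []
--     for i, seg in enumerate(textsegs):
--         if i == 0:
--             merged_textsegs.append(seg)
--         else:
--             start_end = seg[0]
--             word = seg[1]
--             if start_end == textsegs[i - 1][0]:
--                 merged_textsegs[-1][1] += word
--             else:
--                 merged_textsegs.append(seg)
--     return merged_textsegs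
-- ===== SOURCE B (Python) =====
-- import copy
--
--
-- def merge_disco_textsegs(textsegs):
--     # merge text segments with the same start and end time into one
--     segs = copy.deepcopy(textsegs)
--     return _merge_runs(segs)
--
--
-- def _merge_runs(segs):
--     # recursive run-splitting: peel one maximal run of equal start_end off the
--     # front, fold all its words into the run's first segment at once, recurse.
--     if not segs:
--         return []
--     k = 1
--     while k < len(segs) and segs[k][0] == segs[0][0]:
--         k += 1
--     head = segs[0]
--     if k > 1:
--         head[1] += ''.join(s[1] for s in segs[1:k])
--     return [head] + _merge_runs(segs[k:])
-- ===== Notes on version B (the rewrite author's own statement) =====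
-- stated objective: alternative
-- what changed: Replaced A's single index-based pass (lookback at textsegs[i-1], in-place incremental += on merged[-1][1]) by a recursive run-splitting decomposition: peel one maximal run of equal start_end off the front, concatenate that run's words in one bulk ''.join, and recurse on the remainder.
import Mathlib
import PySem

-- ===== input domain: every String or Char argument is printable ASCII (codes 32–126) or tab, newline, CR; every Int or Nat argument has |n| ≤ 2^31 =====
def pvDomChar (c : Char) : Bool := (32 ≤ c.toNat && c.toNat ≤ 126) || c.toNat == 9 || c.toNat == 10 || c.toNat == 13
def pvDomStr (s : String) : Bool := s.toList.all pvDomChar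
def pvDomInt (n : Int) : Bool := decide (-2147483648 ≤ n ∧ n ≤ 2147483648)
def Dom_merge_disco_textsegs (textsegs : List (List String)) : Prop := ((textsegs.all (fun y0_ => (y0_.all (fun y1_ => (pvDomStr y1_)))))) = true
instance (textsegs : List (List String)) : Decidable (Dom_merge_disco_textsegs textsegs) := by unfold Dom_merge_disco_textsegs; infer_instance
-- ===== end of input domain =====

-- B replaces A's index-based single pass (lookback via textsegs[i-1], incremental in-place
-- += on merged[-1][1]) by a recursive run-splitting decomposition: peel one maximal run of
-- equal start_end, fold its words with one bulk join, recurse (objective: alternative;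
-- return-value equivalence — neither version mutates its input).


-- ===== PORT A =====
-- The loop body of A (merged[-1][1] += word is modelled as dropLast ++ [updated last]);
-- deepcopy only protects the caller's lists — in value semantics it is the identity.
def mergeBodyA (textsegs : List (List String)) (merged : List (List String))
    (iseg : Int × List String) : List (List String) :=
  if iseg.1 = 0 then
    merged ++ [iseg.2]
  else
    let start_end := PySem.List.pyGetD iseg.2 0 ""
    let word := PySem.List.pyGetD iseg.2 1 ""
    if start_end = PySem.List.pyGetD (PySem.List.pyGetD textsegs (iseg.1 - 1) []) 0 "" then
      let last := PySem.List.pyGetD merged (-1) []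
      merged.dropLast ++ [PySem.List.pySetD last 1 (PySem.List.pyGetD last 1 "" ++ word)]
    else
      merged ++ [iseg.2]

def merge_disco_textsegs (textsegs : List (List String)) : List (List String) :=
  (PySem.List.enumerate textsegs 0).foldl (mergeBodyA textsegs) []

-- ===== PORT B =====
-- the while loop 'k = 1; while k < len(segs) and segs[k][0] == segs[0][0]: k += 1'
-- together with the slices segs[1:k] / segs[k:]: split off the leading maximal run.
def pvRunSplit (key : String) : List (List String) → List (List String) × List (List String)
  | [] => ([], [])
  | s :: l =>
    if PySem.List.pyGetD s 0 "" = key then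
      let p := pvRunSplit key l
      (s :: p.1, p.2)
    else ([], s :: l)

-- ''.join(s[1] for s in run)
def pvJoinWords (r : List (List String)) : String :=
  PySem.Str.join "" (r.map (fun s => PySem.List.pyGetD s 1 ""))

-- _merge_runs: peel the leading run, bulk-join its words into its first segment, recurse.
-- The fuel argument (list length) only makes the recursion structural; it is never exhausted.
def pvMergeRuns : Nat → List (List String) → List (List String)
  | _, [] => []
  | 0, _ :: _ => []
  | Nat.succ n, s0 :: l =>
    let p := pvRunSplit (PySem.List.pyGetD s0 0 "") l
    (if p.1 = [] then s0
     else PySem.List.pySetD s0 1 (PySem.List.pyGetD s0 1 "" ++ pvJoinWords p.1))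
      :: pvMergeRuns n p.2

def merge_disco_textsegs_alt (textsegs : List (List String)) : List (List String) :=
  pvMergeRuns textsegs.length textsegs

-- ===== PRECONDITION & SPEC =====
-- Pre_ is exactly the set of inputs on which the Python A returns (A raises IndexError elsewhere:
-- it reads seg[0] and seg[1] of every segment after the first, seg[0] of the first segment, and
-- merged[-1][1] of the first segment when the second merges into it).
def Pre_merge_disco_textsegs (textsegs : List (List String)) : Prop :=
  textsegs.length ≤ 1 ∨
    (textsegs.headI ≠ [] ∧ (∀ s ∈ textsegs.tail, 2 ≤ s.length) ∧
      (textsegs.headI.head? = textsegs.tail.headI.head? → 2 ≤ textsegs.headI.length))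
instance (textsegs : List (List String)) : Decidable (Pre_merge_disco_textsegs textsegs) := by
  unfold Pre_merge_disco_textsegs; infer_instance

def pvWitness_merge_disco_textsegs : List (List String) := [["0", "hi"], ["0", "yo"], ["1", "x"]]

def Spec_merge_disco_textsegs (textsegs : List (List String)) (out : List (List String)) : Prop := out = merge_disco_textsegs_alt textsegs
instance (textsegs : List (List String)) (out : List (List String)) : Decidable (Spec_merge_disco_textsegs textsegs out) := by unfold Spec_merge_disco_textsegs; infer_instance

-- ===== CLAIM (what is proved, stated in full; the proofs are below) =====
def Claim_equal_merge_disco_textsegs : Prop := ∀ (textsegs : List (List String)), Dom_merge_disco_textsegs textsegs → Pre_merge_disco_textsegs textsegs → Spec_merge_disco_textsegs textsegs (merge_disco_textsegs textsegs)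

-- ===== LEMMAS AND PROOFS =====

-- A's incremental merge step: merged[-1][1] += word, as a value operation on the run head.
def pvFold (base other : List String) : List String :=
  PySem.List.pySetD base 1 (PySem.List.pyGetD base 1 "" ++ PySem.List.pyGetD other 1 "")

-- A's loop, recursively: prev is the previous original segment, cur the base of the current run.
def mergeRunsA (prev cur : List String) : List (List String) → List (List String)
  | [] => [cur]
  | seg :: l =>
    if PySem.List.pyGetD seg 0 "" = PySem.List.pyGetD prev 0 "" then
      mergeRunsA seg (pvFold cur seg) l
    else
      cur :: mergeRunsA seg seg l

theorem join_empty_cons (a : String) (l : List String) :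
    PySem.Str.join "" (a :: l) = a ++ PySem.Str.join "" l := by
  cases l with
  | nil => simp [PySem.Str.join, PySem.Chars.join_singleton, PySem.Chars.join_nil]
  | cons b t => simp [PySem.Str.join, PySem.Chars.join_cons_cons]

theorem join_empty_nil : PySem.Str.join "" ([] : List String) = "" := by
  simp [PySem.Str.join, PySem.Chars.join_nil]

-- Folding A's incremental += over a nonempty run equals one bulk set with the joined words.
theorem foldl_pvFold_eq_set (r : List (List String)) :
    ∀ base : List String, 2 ≤ base.length → r ≠ [] →
      r.foldl pvFold base =
        PySem.List.pySetD base 1 (PySem.List.pyGetD base 1 "" ++ pvJoinWords r) := by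
  induction r with
  | nil => intro base _ h; exact absurd rfl h
  | cons s r ih =>
    intro base hb _
    have hb1 : (1 : Nat) < base.length := by omega
    rcases eq_or_ne r [] with hr | hr
    · subst hr
      simp [pvFold, pvJoinWords, join_empty_cons, join_empty_nil]
    · have hset : PySem.List.pySetD base (1 : Int) (PySem.List.pyGetD base 1 "" ++ PySem.List.pyGetD s 1 "")
          = base.set 1 (PySem.List.pyGetD base 1 "" ++ PySem.List.pyGetD s 1 "") := by
        simp [PySem.List.pySetD_of_nonneg]
      have hlen : 2 ≤ (pvFold base s).length := by
        simp [pvFold, PySem.List.pySetD_of_nonneg]; omega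
      rw [List.foldl_cons, ih (pvFold base s) hlen hr]
      have hget : PySem.List.pyGetD (pvFold base s) 1 ""
          = PySem.List.pyGetD base 1 "" ++ PySem.List.pyGetD s 1 "" := by
        simp [pvFold, PySem.List.pySetD_of_nonneg, PySem.List.pyGetD_ofNat',
          List.getD_eq_getElem?_getD, List.getElem?_set_self hb1]
      have hss : PySem.List.pySetD (pvFold base s) 1
            (PySem.List.pyGetD base 1 "" ++ PySem.List.pyGetD s 1 "" ++ pvJoinWords r)
          = PySem.List.pySetD base 1
            (PySem.List.pyGetD base 1 "" ++ PySem.List.pyGetD s 1 "" ++ pvJoinWords r) := by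
        simp [pvFold, PySem.List.pySetD_of_nonneg, List.set_set]
      rw [hget, hss]
      have hj : pvJoinWords (s :: r)
          = PySem.List.pyGetD s 1 "" ++ pvJoinWords r := by
        simp [pvJoinWords, join_empty_cons]
      rw [hj, String.append_assoc]

-- A's recursion equals B's run-splitting recursion (any sufficient fuel).
theorem mergeRunsA_eq_alt (l : List (List String)) :
    ∀ prev cur (n : Nat), l.length ≤ n → (∀ s ∈ l, 2 ≤ s.length) →
      mergeRunsA prev cur l =
        (pvRunSplit (PySem.List.pyGetD prev 0 "") l).1.foldl pvFold cur
          :: pvMergeRuns n (pvRunSplit (PySem.List.pyGetD prev 0 "") l).2 := by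
  induction l with
  | nil =>
    intro prev cur n _ _
    cases n <;> simp [mergeRunsA, pvRunSplit, pvMergeRuns]
  | cons seg l ih =>
    intro prev cur n hn hlen
    have hlen' : ∀ s ∈ l, 2 ≤ s.length := fun s hs => hlen s (by simp [hs])
    simp only [mergeRunsA, pvRunSplit]
    by_cases h : PySem.List.pyGetD seg 0 "" = PySem.List.pyGetD prev 0 ""
    · rw [if_pos h, if_pos h]
      rw [ih seg (pvFold cur seg) n (by simp at hn; omega) hlen', h]
      rfl
    · rw [if_neg h, if_neg h]
      cases n with
      | zero => simp at hn
      | succ m =>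
        simp only [pvMergeRuns]
        rw [ih seg seg m (by simp at hn; omega) hlen']
        rcases hp : (pvRunSplit (PySem.List.pyGetD seg 0 "") l).1 with _ | ⟨t, r⟩
        · simp [hp, List.foldl_nil]
        · have hseg : 2 ≤ seg.length := hlen seg (by simp)
          rw [foldl_pvFold_eq_set (t :: r) seg hseg (by simp)]
          simp [hp]

-- Index plumbing: A's foldl over enumerate equals mergeRunsA.
theorem foldA (full : List (List String)) (suf : List (List String)) :
    ∀ (j : Nat) (M : List (List String)) (cur prev : List String),
      1 ≤ j → full.drop (j - 1) = prev :: suf →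
      (PySem.List.enumerate suf (j : Int)).foldl (mergeBodyA full) (M ++ [cur]) =
        M ++ mergeRunsA prev cur suf := by
  induction suf with
  | nil => intro j M cur prev _ _; simp [PySem.List.enumerate, mergeRunsA]
  | cons seg suf ih =>
    intro j M cur prev hj hdrop
    have hj0 : (j : Int) ≠ 0 := by exact_mod_cast Nat.one_le_iff_ne_zero.mp hj
    have hidx : PySem.List.pyGetD full ((j : Int) - 1) [] = prev := by
      have hcast : (j : Int) - 1 = ((j - 1 : Nat) : Int) := by omega
      have h2 : (full.drop (j - 1))[0]? = full[(j - 1) + 0]? := List.getElem?_drop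
      rw [hdrop] at h2
      have h3 : full[j - 1]? = some prev := by simpa using h2.symm
      rw [hcast, PySem.List.pyGetD_natCast]
      simp [List.getD, h3]
    have hdrop' : full.drop ((j + 1) - 1) = seg :: suf := by
      have h4 : full.drop ((j - 1) + 1) = (full.drop (j - 1)).tail := by
        rw [← List.drop_drop, List.drop_one]
      have hj1 : (j + 1) - 1 = (j - 1) + 1 := by omega
      rw [hj1, h4, hdrop]; rfl
    rw [PySem.List.enumerate_cons, List.foldl_cons]
    have hcast1 : ((j : Int) + 1) = ((j + 1 : Nat) : Int) := by push_cast; ring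
    by_cases h : PySem.List.pyGetD seg 0 "" = PySem.List.pyGetD prev 0 ""
    · have hbody : mergeBodyA full (M ++ [cur]) ((j : Int), seg) = M ++ [pvFold cur seg] := by
        simp only [mergeBodyA, if_neg hj0, hidx]
        rw [if_pos h, PySem.List.pyGetD_neg_one_append_singleton M cur []]
        simp [pvFold]
      rw [hbody, hcast1, ih (j + 1) M (pvFold cur seg) seg (by omega) hdrop']
      simp [mergeRunsA, h]
    · have hbody : mergeBodyA full (M ++ [cur]) ((j : Int), seg) = (M ++ [cur]) ++ [seg] := by
        simp only [mergeBodyA, if_neg hj0, hidx]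
        rw [if_neg h]
      rw [hbody, hcast1, ih (j + 1) (M ++ [cur]) seg seg (by omega) hdrop']
      simp [mergeRunsA, h, List.append_assoc]

theorem mergeA_eq_mergeRunsA (s0 : List String) (rest : List (List String)) :
    merge_disco_textsegs (s0 :: rest) = mergeRunsA s0 s0 rest := by
  unfold merge_disco_textsegs
  rw [PySem.List.enumerate_cons, List.foldl_cons]
  have hbody0 : mergeBodyA (s0 :: rest) [] ((0 : Int), s0) = [] ++ [s0] := by
    simp [mergeBodyA]
  rw [hbody0]
  have hcast : ((0 : Int) + 1) = ((1 : Nat) : Int) := by norm_num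
  rw [hcast]
  simpa using foldA (s0 :: rest) rest 1 [] s0 s0 (by omega) (by simp)

-- ===== VERDICT (by name: the statement is the Claim_ definition above) =====
theorem merge_disco_textsegs_spec : Claim_equal_merge_disco_textsegs := by
  intro ts _ hpre
  unfold Spec_merge_disco_textsegs
  match ts with
  | [] => simp [merge_disco_textsegs, merge_disco_textsegs_alt, pvMergeRuns, PySem.List.enumerate]
  | s0 :: l =>
    have hlen : ∀ s ∈ l, 2 ≤ s.length := by
      rcases hpre with hp | ⟨_, ht, _⟩
      · intro s hs
        cases l with
        | nil => cases hs
        | cons a t => simp at hp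
      · exact ht
    rw [mergeA_eq_mergeRunsA, mergeRunsA_eq_alt l s0 s0 l.length le_rfl hlen]
    show _ = pvMergeRuns (s0 :: l).length (s0 :: l)
    simp only [List.length_cons, pvMergeRuns]
    rcases hp : (pvRunSplit (PySem.List.pyGetD s0 0 "") l).1 with _ | ⟨t, r⟩
    · simp [hp]
    · -- the second segment merges into the first: Pre_ gives 2 ≤ s0.length
      have hs0 : 2 ≤ s0.length := by
        cases l with
        | nil => simp [pvRunSplit] at hp
        | cons s1 l' =>
          rcases hpre with hp1 | ⟨h0, ht, hcond⟩
          · simp at hp1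
          · have hs1 : 2 ≤ s1.length := ht s1 (by simp)
            have hkey : PySem.List.pyGetD s1 0 "" = PySem.List.pyGetD s0 0 "" := by
              by_contra hk
              simp [pvRunSplit, hk] at hp
            obtain ⟨c0, cs0, rfl⟩ := List.exists_cons_of_ne_nil h0
            obtain ⟨c1, cs1, rfl⟩ := List.exists_cons_of_ne_nil
              (show s1 ≠ [] by intro hn; rw [hn] at hs1; simp at hs1)
            apply hcond
            simp only [List.headI, List.tail, List.head?]
            simp [PySem.List.pyGetD_zero_cons] at hkey
            simp [hkey]
      rw [foldl_pvFold_eq_set (t :: r) s0 hs0 (by simp)]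
      simp [hp]
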